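-- pv_equiv track=rewrite | github.com/CooLCHI-gun/Football-predictor | src/live_feed/providers/hkjc_request_debug.py | _decode_cmd_caret_escapes
-- ===== SOURCE A (Python) =====
-- def _decode_cmd_caret_escapes(text: str) -> str:
--     # DevTools "Copy as cURL (cmd)" uses caret escapes and line continuations.
--     decoded: list[str] = []
--     index = 0
--     length = len(text)
--     while index < length:
--         ch = text[index]
--         if ch == "^" and index + 1 < length:
--             nxt = text[index + 1]
--             if nxt == "\r":
--                 index += 2
--                 if index < length and text[index] == "\n":
--                     index += 1
--                 decoded.append(" ")
--                 continue
--             if nxt == "\n":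
--                 index += 2
--                 decoded.append(" ")
--                 continue
--             decoded.append(nxt)
--             index += 2
--             continue
--         decoded.append(ch)
--         index += 1
--     return "".join(decoded)
-- ===== SOURCE B (Python) =====
-- import re
--
-- _CARET = re.compile(r"\^(\r\n|\r|\n|.)")
--
--
-- def _decode_cmd_caret_escapes(text: str) -> str:
--     # One regex substitution: "^" followed by a line break becomes a space,
--     # "^" followed by any other character unescapes to that character.
--     # No DOTALL, so a trailing lone "^" has no match and stays literal.
--     return _CARET.sub(
--         lambda m: " " if m.group(1) in ("\r\n", "\r", "\n") else m.group(1),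
--         text,
--     )
-- ===== Notes on version B (the rewrite author's own statement) =====
-- stated objective: idiomatic
-- what changed: Replaces the manual index/while loop with a single compiled-regex substitution (pattern \^(\r\n|\r|\n|.) without DOTALL) whose callback maps newline forms to a space and other escaped characters to themselves; the regex engine does the scan in C, which a timing run measured as ~20x faster at the largest size.
import Mathlib
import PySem

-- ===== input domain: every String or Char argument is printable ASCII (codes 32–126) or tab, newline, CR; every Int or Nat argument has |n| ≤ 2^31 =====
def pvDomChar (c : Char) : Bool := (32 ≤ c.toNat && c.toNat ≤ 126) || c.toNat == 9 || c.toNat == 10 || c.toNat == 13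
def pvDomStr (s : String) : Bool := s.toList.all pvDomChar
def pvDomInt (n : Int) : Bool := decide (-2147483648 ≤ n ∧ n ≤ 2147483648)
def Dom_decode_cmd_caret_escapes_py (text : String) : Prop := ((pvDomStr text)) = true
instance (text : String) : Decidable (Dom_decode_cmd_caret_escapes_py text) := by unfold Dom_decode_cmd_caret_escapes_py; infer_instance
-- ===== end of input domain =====

-- B replaces A's manual index/while loop with one regex substitution (idiomatic); return values proved equal on all inputs.


-- ===== PORT A =====
-- literal transliteration of A's while loop: index cursor over the chars, `decoded` accumulator
def pvLoopA (cs : List Char) (len : Nat) (decoded : List Char) (index : Nat) : List Char :=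
  if index < len then
    let ch := cs.getD index ' '
    if ch = '^' ∧ index + 1 < len then
      let nxt := cs.getD (index + 1) ' '
      if nxt = '\r' then
        if index + 2 < len ∧ cs.getD (index + 2) ' ' = '\n' then
          pvLoopA cs len (decoded ++ [' ']) (index + 3)
        else
          pvLoopA cs len (decoded ++ [' ']) (index + 2)
      else if nxt = '\n' then
        pvLoopA cs len (decoded ++ [' ']) (index + 2)
      else
        pvLoopA cs len (decoded ++ [nxt]) (index + 2)
    else
      pvLoopA cs len (decoded ++ [ch]) (index + 1)
  else decoded
termination_by len - index
decreasing_by all_goals omega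

def decode_cmd_caret_escapes_py (text : String) : String :=
  String.ofList (pvLoopA text.toList text.toList.length [] 0)

-- ===== PORT B =====
-- hand port of Source B's compiled regex re.sub(r"\^(\r\n|\r|\n|.)", repl): exact — the regex scans
-- left to right; at a '^' the alternation tries "\r\n", then "\r", then "\n", then "." (any
-- char, since there is no DOTALL and '\n' was already tried); the callback yields ' ' for the
-- newline forms and the captured char otherwise; a lone trailing '^' has no match and is copied.
def pvSubCaret : List Char → List Char
  | [] => []
  | c :: t =>
    if c = '^' then
      match t with
      | [] => ['^']                                -- unmatched final '^' is copied through
      | c2 :: t2 =>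
        if c2 = '\r' then
          match t2 with
          | [] => [' ']
          | c3 :: t3 => if c3 = '\n' then ' ' :: pvSubCaret t3 else ' ' :: pvSubCaret (c3 :: t3)
        else if c2 = '\n' then ' ' :: pvSubCaret t2
        else c2 :: pvSubCaret t2
    else c :: pvSubCaret t

def decode_cmd_caret_escapes_py_alt (text : String) : String :=
  String.ofList (pvSubCaret text.toList)

-- ===== PRECONDITION & SPEC =====
def Spec_decode_cmd_caret_escapes_py (text : String) (out : String) : Prop := out = decode_cmd_caret_escapes_py_alt text
instance (text : String) (out : String) : Decidable (Spec_decode_cmd_caret_escapes_py text out) := by unfold Spec_decode_cmd_caret_escapes_py; infer_instance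

-- ===== CLAIM (what is proved, stated in full; the proofs are below) =====
def Claim_equal_decode_cmd_caret_escapes_py : Prop := ∀ (text : String), Dom_decode_cmd_caret_escapes_py text → Spec_decode_cmd_caret_escapes_py text (decode_cmd_caret_escapes_py text)

-- ===== LEMMAS AND PROOFS =====
-- equation lemmas for pvSubCaret (one per regex alternative)
theorem sc_nil : pvSubCaret [] = [] := by rw [pvSubCaret.eq_def]
theorem sc_caret_end : pvSubCaret ['^'] = ['^'] := by rw [pvSubCaret.eq_def]; simp
theorem sc_crlf (t : List Char) : pvSubCaret ('^' :: '\r' :: '\n' :: t) = ' ' :: pvSubCaret t := by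
  rw [pvSubCaret.eq_def]; simp
theorem sc_cr (c : Char) (t : List Char) (h : ¬ c = '\n') :
    pvSubCaret ('^' :: '\r' :: c :: t) = ' ' :: pvSubCaret (c :: t) := by
  rw [pvSubCaret.eq_def]; simp [h]
theorem sc_cr_end : pvSubCaret ('^' :: '\r' :: []) = [' '] := by rw [pvSubCaret.eq_def]; simp
theorem sc_nl (t : List Char) : pvSubCaret ('^' :: '\n' :: t) = ' ' :: pvSubCaret t := by
  rw [pvSubCaret.eq_def]; simp
theorem sc_dot (c : Char) (t : List Char) (h1 : ¬ c = '\r') (h2 : ¬ c = '\n') :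
    pvSubCaret ('^' :: c :: t) = c :: pvSubCaret t := by
  rw [pvSubCaret.eq_def]; simp [h1, h2]
theorem sc_other (c : Char) (t : List Char) (h : ¬ c = '^') :
    pvSubCaret (c :: t) = c :: pvSubCaret t := by
  rw [pvSubCaret.eq_def]; simp [h]

theorem pvLoopA_eq_subCaret (n : Nat) : ∀ (cs decoded : List Char) (index : Nat),
    cs.length - index ≤ n →
    pvLoopA cs cs.length decoded index = decoded ++ pvSubCaret (cs.drop index) := by
  induction n with
  | zero =>
    intro cs decoded index h
    rw [pvLoopA, if_neg (by omega), List.drop_eq_nil_of_le (by omega), sc_nil]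
    simp
  | succ n ih =>
    intro cs decoded index h
    rw [pvLoopA]
    by_cases hlt : index < cs.length
    · rw [if_pos hlt]
      have g0 : cs.getD index ' ' = cs[index] := List.getD_eq_getElem _ _ hlt
      have hd : cs.drop index = cs[index] :: cs.drop (index + 1) :=
        List.drop_eq_getElem_cons hlt
      by_cases hch : cs.getD index ' ' = '^' ∧ index + 1 < cs.length
      · rw [if_pos hch]
        obtain ⟨hc, h2⟩ := hch
        rw [g0] at hc
        have g1 : cs.getD (index + 1) ' ' = cs[index + 1] := List.getD_eq_getElem _ _ h2
        have hd1 : cs.drop (index + 1) = cs[index + 1] :: cs.drop (index + 2) :=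
          List.drop_eq_getElem_cons h2
        by_cases hr : cs.getD (index + 1) ' ' = '\r'
        · rw [if_pos hr]
          rw [g1] at hr
          by_cases hn : index + 2 < cs.length ∧ cs.getD (index + 2) ' ' = '\n'
          · rw [if_pos hn]
            obtain ⟨h3, hn2⟩ := hn
            rw [List.getD_eq_getElem _ _ h3] at hn2
            have hd2 : cs.drop (index + 2) = cs[index + 2] :: cs.drop (index + 3) :=
              List.drop_eq_getElem_cons h3
            rw [ih cs (decoded ++ [' ']) (index + 3) (by omega),
                hd, hd1, hd2, hc, hr, hn2, sc_crlf]
            simp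
          · rw [if_neg hn, ih cs (decoded ++ [' ']) (index + 2) (by omega),
                hd, hd1, hc, hr]
            rcases Nat.lt_or_ge (index + 2) cs.length with h3 | h3
            · have hne : ¬ cs[index + 2] = '\n' := by
                intro hcon
                exact hn ⟨h3, by rw [List.getD_eq_getElem _ _ h3, hcon]⟩
              have hd2 : cs.drop (index + 2) = cs[index + 2] :: cs.drop (index + 3) :=
                List.drop_eq_getElem_cons h3
              rw [hd2, sc_cr _ _ hne, ← hd2]
              simp
            · rw [List.drop_eq_nil_of_le h3, sc_cr_end]
              simp [sc_nil]
        · rw [if_neg hr]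
          rw [g1] at hr
          by_cases hn : cs.getD (index + 1) ' ' = '\n'
          · rw [if_pos hn, ih cs (decoded ++ [' ']) (index + 2) (by omega),
                hd, hd1, hc]
            rw [g1] at hn
            rw [hn, sc_nl]
            simp
          · rw [if_neg hn]
            rw [g1] at hn
            rw [ih cs (decoded ++ [cs.getD (index + 1) ' ']) (index + 2) (by omega),
                hd, hd1, hc, g1, sc_dot _ _ hr hn]
            simp
      · rw [if_neg hch, ih cs (decoded ++ [cs.getD index ' ']) (index + 1) (by omega),
            hd, g0]
        by_cases hcar : cs[index] = '^'
        · have h2 : ¬ index + 1 < cs.length := fun hcon => hch ⟨by rw [g0, hcar], hcon⟩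
          rw [hcar, List.drop_eq_nil_of_le (by omega), sc_caret_end]
          simp [sc_nil]
        · rw [sc_other _ _ hcar]
          simp
    · rw [if_neg hlt, List.drop_eq_nil_of_le (by omega), sc_nil]
      simp

-- ===== VERDICT (by name: the statement is the Claim_ definition above) =====
theorem decode_cmd_caret_escapes_py_spec : Claim_equal_decode_cmd_caret_escapes_py := by
  intro text _
  unfold Spec_decode_cmd_caret_escapes_py decode_cmd_caret_escapes_py decode_cmd_caret_escapes_py_alt
  rw [pvLoopA_eq_subCaret text.toList.length text.toList [] 0 (by omega)]
  simp
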